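-- pv_equiv track=rewrite | github.com/TaterTotterson/Tater | plugin_kernel.py | expand_plugin_platforms
-- ===== SOURCE A (Python) =====
-- from typing import Any, Dict, Iterable, List, Optional, Tuple
--
-- _BOTH_EXPANSION: Tuple[str, ...] = (
--     "webui",
--     "discord",
--     "irc",
--     "homeassistant",
--     "homekit",
--     "matrix",
--     "telegram",
--     "xbmc",
-- )
--
-- def normalize_platform(platform: Optional[str]) -> str:
--     return (platform or "").strip().lower()
--
-- def _normalize_platforms(platforms: Iterable[str]) -> List[str]:
--     out: List[str] = []
--     for item in platforms or []:
--         p = normalize_platform(item)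
--         if p and p not in out:
--             out.append(p)
--     return out
--
-- def expand_plugin_platforms(platforms: Iterable[str]) -> List[str]:
--     raw = _normalize_platforms(platforms)
--     expanded: List[str] = []
--     for p in raw:
--         if p == "both":
--             for v in _BOTH_EXPANSION:
--                 if v not in expanded:
--                     expanded.append(v)
--             continue
--         if p not in expanded:
--             expanded.append(p)
--     return expanded
-- ===== SOURCE B (Python) =====
-- from typing import Iterable, List, Optional, Tuple
--
-- _BOTH_EXPANSION: Tuple[str, ...] = (
--     "webui",
--     "discord",
--     "irc",
--     "homeassistant",
--     "homekit",
--     "matrix",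
--     "telegram",
--     "xbmc",
-- )
--
-- def normalize_platform(platform: Optional[str]) -> str:
--     return (platform or "").strip().lower()
--
-- def expand_plugin_platforms(platforms: Iterable[str]) -> List[str]:
--     # expand/flatten first (duplicates allowed), then dedup once keeping first occurrences
--     seq: List[str] = []
--     for item in platforms or []:
--         p = normalize_platform(item)
--         if not p:
--             continue
--         if p == "both":
--             seq.extend(_BOTH_EXPANSION)
--         else:
--             seq.append(p)
--     return list(dict.fromkeys(seq))
-- ===== Notes on version B (the rewrite author's own statement) =====
-- stated objective: faster
-- what changed: Replaced A's two dedup stages (dedup-normalize pass and an expansion loop with inner list-membership checks, both quadratic) by a single flatten pass that appends/extends freely plus one hash-based first-occurrence dedup via dict.fromkeys.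
import Mathlib
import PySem

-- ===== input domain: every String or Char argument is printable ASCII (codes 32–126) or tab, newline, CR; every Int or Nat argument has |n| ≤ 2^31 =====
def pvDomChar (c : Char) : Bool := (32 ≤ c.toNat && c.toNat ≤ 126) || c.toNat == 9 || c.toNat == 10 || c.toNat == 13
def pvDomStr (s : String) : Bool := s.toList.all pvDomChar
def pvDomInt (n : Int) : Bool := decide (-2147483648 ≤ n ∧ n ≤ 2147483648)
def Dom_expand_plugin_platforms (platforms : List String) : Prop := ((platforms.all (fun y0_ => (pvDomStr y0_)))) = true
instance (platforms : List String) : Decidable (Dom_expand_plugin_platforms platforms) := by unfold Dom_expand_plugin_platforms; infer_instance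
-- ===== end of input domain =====

-- B replaces A's dedup-normalize stage plus membership-checked expansion loop (quadratic list scans)
-- with one flatten pass and a single hash-based first-occurrence dedup via dict.fromkeys; measured faster.

-- ===== PORT A =====
def pvBothExpansion : List String :=
  ["webui", "discord", "irc", "homeassistant", "homekit", "matrix", "telegram", "xbmc"]

-- (platform or "") is the identity on an actual str argument; .strip().lower() is exact via PySem
def normalize_platform (platform : String) : String :=
  PySem.Str.lower (PySem.Str.strip platform)

def pvNormalizePlatforms (platforms : List String) : List String :=
  platforms.foldl (fun out item =>
    let p := normalize_platform item
    if p ≠ "" ∧ p ∉ out then out ++ [p] else out) []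

def expand_plugin_platforms (platforms : List String) : List String :=
  let raw := pvNormalizePlatforms platforms
  raw.foldl (fun expanded p =>
    if p = "both" then
      pvBothExpansion.foldl (fun e v => if v ∈ e then e else e ++ [v]) expanded
    else if p ∈ expanded then expanded else expanded ++ [p]) []

-- ===== PORT B =====
def expand_plugin_platforms_alt (platforms : List String) : List String :=
  let seq := platforms.foldl (fun s item =>
    let p := normalize_platform item
    if p = "" then s
    else if p = "both" then s ++ pvBothExpansion
    else s ++ [p]) []
  PySem.List.dedup seq   -- list(dict.fromkeys(seq))

-- ===== PRECONDITION & SPEC =====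
def Spec_expand_plugin_platforms (platforms : List String) (out : List String) : Prop := out = expand_plugin_platforms_alt platforms
instance (platforms : List String) (out : List String) : Decidable (Spec_expand_plugin_platforms platforms out) := by unfold Spec_expand_plugin_platforms; infer_instance

-- ===== CLAIM (what is proved, stated in full; the proofs are below) =====
def Claim_equal_expand_plugin_platforms : Prop := ∀ (platforms : List String), Dom_expand_plugin_platforms platforms → Spec_expand_plugin_platforms platforms (expand_plugin_platforms platforms)

-- ===== LEMMAS AND PROOFS =====

-- first-occurrence dedup step and fold
def pvStep (acc : List String) (v : String) : List String :=
  if v ∈ acc then acc else acc ++ [v]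

def pvF (acc : List String) (xs : List String) : List String := xs.foldl pvStep acc

-- per-item expansion
def pvE (p : String) : List String := if p = "both" then pvBothExpansion else [p]

-- the items A's normalizer newly emits given already-seen `out`
def pvNew (out : List String) : List String → List String
  | [] => []
  | p :: rest =>
      if p ≠ "" ∧ p ∉ out then p :: pvNew (out ++ [p]) rest else pvNew out rest

-- B's flattened sequence of a normalized list
def pvFlat : List String → List String
  | [] => []
  | p :: rest => (if p = "" then [] else pvE p) ++ pvFlat rest

theorem pvMem_F_left {v : String} (acc xs : List String) (h : v ∈ acc) : v ∈ pvF acc xs := by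
  induction xs generalizing acc with
  | nil => exact h
  | cons x rest ih =>
      simp only [pvF, List.foldl_cons]
      exact ih _ (by unfold pvStep; split <;> simp [h])

theorem pvMem_F_right {v : String} (acc xs : List String) (h : v ∈ xs) : v ∈ pvF acc xs := by
  induction xs generalizing acc with
  | nil => cases h
  | cons x rest ih =>
      simp only [pvF, List.foldl_cons]
      rcases List.mem_cons.mp h with rfl | h'
      · refine pvMem_F_left _ _ ?_
        unfold pvStep; split <;> simp_all
      · exact ih _ h'

theorem pvF_id_of_subset (acc xs : List String) (h : ∀ v ∈ xs, v ∈ acc) : pvF acc xs = acc := by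
  induction xs with
  | nil => rfl
  | cons x rest ih =>
      simp only [pvF, List.foldl_cons] at *
      rw [pvStep, if_pos (h x (by simp))]
      exact ih (fun v hv => h v (by simp [hv]))

theorem pvF_append (acc a b : List String) : pvF acc (a ++ b) = pvF (pvF acc a) b := by
  simp [pvF, List.foldl_append]

-- main lemma: dedup-then-expand equals expand-then-dedup
theorem pvMain (l out acc : List String)
    (h : ∀ p ∈ out, ∀ v ∈ pvE p, v ∈ acc) :
    pvF acc ((pvNew out l).flatMap pvE) = pvF acc (pvFlat l) := by
  induction l generalizing out acc with
  | nil => simp [pvNew, pvFlat]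
  | cons p rest ih =>
      by_cases hp : p = ""
      · subst hp
        simp only [pvNew, pvFlat]
        rw [if_neg (by simp)]
        simpa using ih out acc h
      · by_cases hmem : p ∈ out
        · simp only [pvNew, pvFlat]
          rw [if_neg (by simp [hmem]), if_neg hp, pvF_append,
            pvF_id_of_subset acc (pvE p) (h p hmem)]
          exact ih out acc h
        · simp only [pvNew, pvFlat]
          rw [if_pos ⟨hp, hmem⟩, if_neg hp, List.flatMap_cons, pvF_append, pvF_append]
          refine ih (out ++ [p]) (pvF acc (pvE p)) ?_
          intro q hq v hv
          rcases List.mem_append.mp hq with hq | hq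
          · exact pvMem_F_left _ _ (h q hq v hv)
          · simp only [List.mem_singleton] at hq; subst hq
            exact pvMem_F_right _ _ hv

-- A's ports rewritten into the pvF/pvNew/pvFlat vocabulary
theorem pvNormalize_eq (platforms : List String) :
    pvNormalizePlatforms platforms = pvNew [] (platforms.map normalize_platform) := by
  have key : ∀ (l : List String) (out : List String),
      l.foldl (fun out p => if p ≠ "" ∧ p ∉ out then out ++ [p] else out) out
        = out ++ pvNew out l := by
    intro l
    induction l with
    | nil => simp [pvNew]
    | cons p rest ih =>
        intro out
        by_cases hc : p ≠ "" ∧ p ∉ out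
        · simp only [List.foldl_cons, pvNew, if_pos hc, ih]; simp
        · simp only [List.foldl_cons, pvNew, if_neg hc, ih]
  have : pvNormalizePlatforms platforms
      = (platforms.map normalize_platform).foldl
          (fun out p => if p ≠ "" ∧ p ∉ out then out ++ [p] else out) [] := by
    simp [pvNormalizePlatforms, List.foldl_map]
  rw [this, key]; simp

theorem pvA_eq (raw acc : List String) :
    raw.foldl (fun expanded p =>
      if p = "both" then
        pvBothExpansion.foldl (fun e v => if v ∈ e then e else e ++ [v]) expanded
      else if p ∈ expanded then expanded else expanded ++ [p]) acc
    = pvF acc (raw.flatMap pvE) := by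
  induction raw generalizing acc with
  | nil => simp [pvF]
  | cons p rest ih =>
      simp only [List.foldl_cons, List.flatMap_cons, pvF_append]
      rw [ih]
      congr 1
      by_cases hb : p = "both"
      · simp only [hb, pvE, pvF]; rfl
      · simp [hb, pvE, pvF, pvStep, List.foldl_cons]

theorem pvB_eq (platforms : List String) :
    expand_plugin_platforms_alt platforms
      = pvF [] (pvFlat (platforms.map normalize_platform)) := by
  have hadd : (PySem.Set.add (α := String)) = pvStep := by
    funext s x
    simp [PySem.Set.add, pvStep]
  have hded : ∀ xs : List String, PySem.List.dedup xs = pvF [] xs := by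
    intro xs
    show List.foldl PySem.Set.add PySem.Set.empty xs = pvF [] xs
    rw [hadd]; rfl
  have hseq : ∀ (l : List String) (s : List String),
      l.foldl (fun s p =>
        if p = "" then s else if p = "both" then s ++ pvBothExpansion else s ++ [p]) s
      = s ++ pvFlat l := by
    intro l
    induction l with
    | nil => simp [pvFlat]
    | cons p rest ih =>
        intro s
        by_cases hp : p = ""
        · simp [hp, pvFlat, ih]
        · by_cases hb : p = "both" <;> simp [hp, hb, pvFlat, pvE, ih]
  have : expand_plugin_platforms_alt platforms
      = PySem.List.dedup ((platforms.map normalize_platform).foldl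
          (fun s p => if p = "" then s else if p = "both" then s ++ pvBothExpansion else s ++ [p]) []) := by
    simp [expand_plugin_platforms_alt, List.foldl_map]
  rw [this, hseq]
  simpa using hded _

-- ===== VERDICT (by name: the statement is the Claim_ definition above) =====
theorem expand_plugin_platforms_spec : Claim_equal_expand_plugin_platforms := by
  intro platforms _
  show expand_plugin_platforms platforms = expand_plugin_platforms_alt platforms
  rw [expand_plugin_platforms, pvNormalize_eq, pvA_eq, pvB_eq]
  exact pvMain _ [] [] (by simp)
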